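-- pv_equiv track=rewrite | github.com/guilhembn/AoC2025 | src/aoc2025/puzzles/5/puzzle_5.py | update_unions
-- ===== SOURCE A (Python) =====
-- def union(range1, range2):
--     lb1, ub1 = range1
--     lb2, ub2 = range2
--     if lb2 > ub1 or lb1 > ub2:
--         # No intersection:
--         return (range1, range2)
--     return (min(lb1, lb2), max(ub1, ub2)), None
--
-- def update_unions(united: list[tuple[int, int]], new_range: tuple[int, int]):
--     to_update = []
--     for ran in united:
--         uni = union(ran, new_range)
--         if uni[1] is not None:
--             continue
--         else:
--             to_update.append((ran, uni[0]))
--     assert len(to_update) <= 2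
--     if len(to_update) == 0:
--         united.append(new_range)
--     else:
--         for to_delete, _ in to_update:
--             united.remove(to_delete)
--         for _, to_add in to_update:
--             united = update_unions(united, to_add)
--     return united
-- ===== SOURCE B (Python) =====
-- def update_unions(united: list[tuple[int, int]], new_range: tuple[int, int]):
--     overlapping = [r for r in united if r[0] <= new_range[1] and new_range[0] <= r[1]]
--     assert len(overlapping) <= 2
--     if not overlapping:
--         united.append(new_range)
--     else:
--         lb = min(new_range[0], *(r[0] for r in overlapping))
--         ub = max(new_range[1], *(r[1] for r in overlapping))
--         for r in overlapping:
--             united.remove(r)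
--         united.append((lb, ub))
--     return united
-- ===== Notes on version B (the rewrite author's own statement) =====
-- stated objective: simpler
-- what changed: A recursively removes each interval overlapping new_range and re-inserts its merge one by one (cascading recursive calls); B scans once for the overlapping intervals, takes the min lower / max upper bound in one aggregate step and appends the single merged interval.
-- outside the precondition, e.g. on update_unions([(3, 4), (1, 3)], (0, 1)): A returns [(0, 4)], B returns [(3, 4), (0, 3)]; on update_unions([(3, 0), (1, 5)], (0, 2)): A returns [(0, 5)], B returns [(3, 0), (0, 5)]; on update_unions([(0, 1), (2, 3), (4, 5)], (0, 5)): A raises AssertionError, B raises AssertionError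
import Mathlib
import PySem

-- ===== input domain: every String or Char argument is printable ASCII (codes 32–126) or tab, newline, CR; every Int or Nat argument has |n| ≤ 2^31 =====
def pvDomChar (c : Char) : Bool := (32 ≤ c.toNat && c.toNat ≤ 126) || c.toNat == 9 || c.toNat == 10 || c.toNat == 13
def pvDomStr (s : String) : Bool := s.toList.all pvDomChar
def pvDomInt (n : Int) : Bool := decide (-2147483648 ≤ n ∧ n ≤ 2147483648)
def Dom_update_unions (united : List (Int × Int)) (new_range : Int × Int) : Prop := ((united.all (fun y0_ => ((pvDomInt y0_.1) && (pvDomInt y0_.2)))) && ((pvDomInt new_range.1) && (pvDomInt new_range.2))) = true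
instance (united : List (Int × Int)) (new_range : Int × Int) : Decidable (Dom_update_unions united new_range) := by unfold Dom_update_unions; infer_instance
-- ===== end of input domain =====

-- B replaces A's recursive remove-and-reinsert cascade by one aggregate merge of the
-- intervals overlapping new_range (objective: simpler).  Both Pythons mutate `united`
-- in place; the equivalence proved here is about the RETURN value only.

-- inclusive overlap test, shared by port B and Pre_ (it is Source B's comprehension condition)
def pvOvl (r s : Int × Int) : Bool := decide (r.1 ≤ s.2) && decide (s.1 ≤ r.2)

-- ===== PORT A =====
-- Python `union(range1, range2)`: returns `(merged, None)` on intersection, else the two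
-- ranges unchanged; ported as an Option — `some merged` iff the second component was None.
def pyUnion (r1 r2 : Int × Int) : Option (Int × Int) :=
  if r2.1 > r1.2 ∨ r1.1 > r2.2 then none
  else some (min r1.1 r2.1, max r1.2 r2.2)

-- A recurses; fuel only makes the same computation total (never exhausted under Pre_).
-- `united.remove(x)` is ported as List.erase (first occurrence); the removed element is
-- always present by construction, so Python's ValueError branch is unreachable.
-- Python's `assert len(to_update) <= 2` raises AssertionError on other inputs; those
-- inputs are excluded by Pre_ and the port's value there is not claimed.
def update_unions_fuel : Nat → List (Int × Int) → (Int × Int) → List (Int × Int)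
  | 0, united, _ => united
  | n+1, united, new_range =>
    let to_update := united.foldl (fun acc ran =>
      match pyUnion ran new_range with
      | none => acc
      | some m => acc ++ [(ran, m)]) ([] : List ((Int × Int) × (Int × Int)))
    if to_update.length = 0 then united ++ [new_range]
    else
      let united' := to_update.foldl (fun u p => u.erase p.1) united
      to_update.foldl (fun u p => update_unions_fuel n u p.2) united'

def update_unions (united : List (Int × Int)) (new_range : Int × Int) : List (Int × Int) :=
  update_unions_fuel (united.length + 3) united new_range

-- ===== PORT B =====
def update_unions_alt (united : List (Int × Int)) (new_range : Int × Int) : List (Int × Int) :=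
  let overlapping := united.filter (fun r => pvOvl r new_range)
  if overlapping.isEmpty then united ++ [new_range]
  else
    let lb := overlapping.foldl (fun a r => min a r.1) new_range.1
    let ub := overlapping.foldl (fun a r => max a r.2) new_range.2
    let united' := overlapping.foldl (fun u r => u.erase r) united
    united' ++ [(lb, ub)]

-- ===== PRECONDITION & SPEC =====

-- hull of two intervals (their merge, `(min lb, max ub)`); used by Pre_ and the lemmas
def pvHull (r s : Int × Int) : Int × Int := (min r.1 s.1, max r.2 s.2)

-- Pre_ says the merge does not CASCADE: at most two intervals overlap new_range, and once
-- they are merged with it the merged interval overlaps no surviving interval — exactly the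
-- situation the function is built for, a list of disjoint intervals around new_range.
-- It excludes (a) inputs where A's `assert` raises (three or more intervals overlap
-- new_range), and (b) inputs whose intervals overlap each other (or are empty, lb > ub),
-- on which A still returns but its recursive re-insertion cascades, merging intervals
-- that do not overlap new_range — an artefact of the recursion, outside the
-- disjoint-interval invariant this function exists to maintain.
def pvPreB (united : List (Int × Int)) (new_range : Int × Int) : Bool :=
  match united.filter (fun r => pvOvl r new_range) with
  | [] => true
  | [r1] => (united.erase r1).all (fun s => !(pvOvl s (pvHull r1 new_range)))
  | [r1, r2] =>
      pvOvl (pvHull r1 new_range) (pvHull r2 new_range) &&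
      !((united.erase r1).erase r2).contains (pvHull r1 new_range) &&
      ((united.erase r1).erase r2).all (fun s =>
        !(pvOvl s (pvHull r1 new_range)) && !(pvOvl s (pvHull r2 new_range)) &&
        !(pvOvl s (pvHull (pvHull r1 new_range) (pvHull r2 new_range))))
  | _ => false

def Pre_update_unions (united : List (Int × Int)) (new_range : Int × Int) : Prop :=
  pvPreB united new_range = true

instance (united : List (Int × Int)) (new_range : Int × Int) : Decidable (Pre_update_unions united new_range) := by
  unfold Pre_update_unions; infer_instance

def pvWitness_update_unions : (List (Int × Int)) × (Int × Int) := ([(0, 1), (4, 6)], (2, 3))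

def Spec_update_unions (united : List (Int × Int)) (new_range : Int × Int) (out : List (Int × Int)) : Prop := out = update_unions_alt united new_range
instance (united : List (Int × Int)) (new_range : Int × Int) (out : List (Int × Int)) : Decidable (Spec_update_unions united new_range out) := by unfold Spec_update_unions; infer_instance

-- ===== CLAIM (what is proved, stated in full; the proofs are below) =====
def Claim_equal_update_unions : Prop := ∀ (united : List (Int × Int)) (new_range : Int × Int), Dom_update_unions united new_range → Pre_update_unions united new_range → Spec_update_unions united new_range (update_unions united new_range)

-- ===== LEMMAS AND PROOFS =====

lemma pyUnion_eq (r s : Int × Int) :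
    pyUnion r s = if pvOvl r s = true then some (pvHull r s) else none := by
  simp only [pyUnion, pvOvl, pvHull, Bool.and_eq_true, decide_eq_true_eq]
  split_ifs with h1 h2 <;> first | rfl | omega

lemma foldl_to_update (new_range : Int × Int) (l : List (Int × Int))
    (acc : List ((Int × Int) × (Int × Int))) :
    l.foldl (fun acc ran =>
      match pyUnion ran new_range with
      | none => acc
      | some m => acc ++ [(ran, m)]) acc
    = acc ++ (l.filter (fun r => pvOvl r new_range)).map (fun r => (r, pvHull r new_range)) := by
  induction l generalizing acc with
  | nil => simp
  | cons x xs ih =>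
    simp only [List.foldl_cons, List.filter_cons, pyUnion_eq] at ih ⊢
    by_cases h : pvOvl x new_range = true
    · simp [h, ih]
    · simp [h, ih]

lemma step_none (united : List (Int × Int)) (new_range : Int × Int) (n : Nat)
    (h : united.filter (fun r => pvOvl r new_range) = []) :
    update_unions_fuel (n+1) united new_range = united ++ [new_range] := by
  simp only [update_unions_fuel, foldl_to_update, h]
  simp

lemma step_one (united : List (Int × Int)) (new_range r : Int × Int) (n : Nat)
    (h : united.filter (fun r => pvOvl r new_range) = [r]) :
    update_unions_fuel (n+1) united new_range
      = update_unions_fuel n (united.erase r) (pvHull r new_range) := by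
  simp only [update_unions_fuel, foldl_to_update, h]
  simp

lemma step_two (united : List (Int × Int)) (new_range r1 r2 : Int × Int) (n : Nat)
    (h : united.filter (fun r => pvOvl r new_range) = [r1, r2]) :
    update_unions_fuel (n+1) united new_range
      = update_unions_fuel n
          (update_unions_fuel n ((united.erase r1).erase r2) (pvHull r1 new_range))
          (pvHull r2 new_range) := by
  simp only [update_unions_fuel, foldl_to_update, h]
  simp

lemma a_one (united : List (Int × Int)) (new_range r1 : Int × Int) (n : Nat)
    (hF : united.filter (fun r => pvOvl r new_range) = [r1])
    (h1 : (united.erase r1).filter (fun r => pvOvl r (pvHull r1 new_range)) = []) :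
    update_unions_fuel (n+2) united new_range = united.erase r1 ++ [pvHull r1 new_range] := by
  rw [show n+2 = (n+1)+1 from rfl, step_one united new_range r1 (n+1) hF,
    step_none _ _ n h1]

lemma a_two (united : List (Int × Int)) (new_range r1 r2 : Int × Int) (n : Nat)
    (hF : united.filter (fun r => pvOvl r new_range) = [r1, r2])
    (hovl : pvOvl (pvHull r1 new_range) (pvHull r2 new_range) = true)
    (hm1not : pvHull r1 new_range ∉ (united.erase r1).erase r2)
    (h1 : ((united.erase r1).erase r2).filter (fun r => pvOvl r (pvHull r1 new_range)) = [])
    (h2 : ((united.erase r1).erase r2).filter (fun r => pvOvl r (pvHull r2 new_range)) = [])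
    (h3 : ((united.erase r1).erase r2).filter
      (fun r => pvOvl r (pvHull (pvHull r1 new_range) (pvHull r2 new_range))) = []) :
    update_unions_fuel (n+3) united new_range
      = (united.erase r1).erase r2
          ++ [pvHull (pvHull r1 new_range) (pvHull r2 new_range)] := by
  rw [show n+3 = (n+2)+1 from rfl, step_two united new_range r1 r2 (n+2) hF,
    show n+2 = (n+1)+1 from rfl, step_none _ _ (n+1) h1]
  have hf2 : (((united.erase r1).erase r2) ++ [pvHull r1 new_range]).filter
      (fun r => pvOvl r (pvHull r2 new_range)) = [pvHull r1 new_range] := by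
    rw [List.filter_append, h2]
    simp [hovl]
  rw [step_one _ _ (pvHull r1 new_range) (n+1) hf2,
    List.erase_append_right _ hm1not]
  simp only [List.erase_cons_head, List.append_nil]
  rw [step_none _ _ n h3]

theorem update_unions_spec : Claim_equal_update_unions := by
  intro united new_range _hdom hpre
  unfold Spec_update_unions
  unfold Pre_update_unions pvPreB at hpre
  rcases hF : united.filter (fun r => pvOvl r new_range) with _ | ⟨r1, _ | ⟨r2, _ | ⟨r3, rest⟩⟩⟩ <;>
    rw [hF] at hpre
  · unfold update_unions
    rw [show united.length + 3 = (united.length + 2) + 1 from rfl,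
      step_none _ _ (united.length + 2) hF]
    simp [update_unions_alt, hF]
  · simp only [List.all_eq_true, Bool.not_eq_true'] at hpre
    have h1 : (united.erase r1).filter (fun r => pvOvl r (pvHull r1 new_range)) = [] :=
      List.filter_eq_nil_iff.mpr (fun s hs => by simp [hpre s hs])
    unfold update_unions
    rw [show united.length + 3 = (united.length + 1) + 2 from rfl,
      a_one united new_range r1 (united.length + 1) hF h1]
    simp only [update_unions_alt, hF]
    simp only [List.isEmpty_cons, List.foldl_cons, List.foldl_nil, Bool.false_eq_true,
      if_false]
    have : pvHull r1 new_range = (min new_range.1 r1.1, max new_range.2 r1.2) := by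
      simp only [pvHull, Prod.mk.injEq]
      constructor <;> omega
    rw [this]
  · simp only [Bool.and_eq_true, List.all_eq_true, Bool.not_eq_true',
      List.contains_eq_mem] at hpre
    obtain ⟨⟨hovl, hnot⟩, hall⟩ := hpre
    have hnot' : pvHull r1 new_range ∉ (united.erase r1).erase r2 := by simpa using hnot
    have h1 : ((united.erase r1).erase r2).filter (fun r => pvOvl r (pvHull r1 new_range)) = [] :=
      List.filter_eq_nil_iff.mpr (fun s hs => by simp [(hall s hs).1.1])
    have h2 : ((united.erase r1).erase r2).filter (fun r => pvOvl r (pvHull r2 new_range)) = [] :=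
      List.filter_eq_nil_iff.mpr (fun s hs => by simp [(hall s hs).1.2])
    have h3 : ((united.erase r1).erase r2).filter
        (fun r => pvOvl r (pvHull (pvHull r1 new_range) (pvHull r2 new_range))) = [] :=
      List.filter_eq_nil_iff.mpr (fun s hs => by simp [(hall s hs).2])
    unfold update_unions
    rw [a_two united new_range r1 r2 united.length hF hovl hnot' h1 h2 h3]
    simp only [update_unions_alt, hF]
    simp only [List.isEmpty_cons, List.foldl_cons, List.foldl_nil, Bool.false_eq_true,
      if_false]
    have : pvHull (pvHull r1 new_range) (pvHull r2 new_range)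
        = (min (min new_range.1 r1.1) r2.1, max (max new_range.2 r1.2) r2.2) := by
      simp only [pvHull, Prod.mk.injEq]
      constructor <;> omega
    rw [this]
  · simp at hpre
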